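-- pv_equiv track=rewrite | github.com/SofiLam13/RedesLab2 | Enlace/emisorAuto.py | codificar_hamming
-- ===== SOURCE A (Python) =====
-- def ascii_a_binario(mensaje):
--     return ''.join(f'{ord(c):08b}' for c in mensaje)
--
-- def codificar_hamming(mensaje):
--     binario = ascii_a_binario(mensaje)
--     resultado = ''
--     for i in range(0, len(binario), 4):
--         datos = binario[i:i+4].ljust(4, '0')
--         p1 = str(int(datos[0]) ^ int(datos[1]) ^ int(datos[3]))
--         p2 = str(int(datos[0]) ^ int(datos[2]) ^ int(datos[3]))
--         p3 = str(int(datos[1]) ^ int(datos[2]) ^ int(datos[3]))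
--         resultado += p1 + p2 + datos[0] + p3 + datos[1:]  # p1 p2 d0 p3 d1 d2 d3
--     return resultado
-- ===== SOURCE B (Python) =====
-- # Table-driven Hamming(7,4): one precomputed codeword per nibble, per-character
-- # nibble extraction instead of building an intermediate binary string.
--
-- def _codeword(n):
--     d = [(n >> (3 - k)) & 1 for k in range(4)]
--     p1 = d[0] ^ d[1] ^ d[3]
--     p2 = d[0] ^ d[2] ^ d[3]
--     p3 = d[1] ^ d[2] ^ d[3]
--     return ''.join(str(b) for b in (p1, p2, d[0], p3, d[1], d[2], d[3]))
--
-- CODEWORDS = [_codeword(n) for n in range(16)]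
--
-- def codificar_hamming(mensaje):
--     partes = []
--     for c in mensaje:
--         o = ord(c)
--         partes.append(CODEWORDS[o >> 4])
--         partes.append(CODEWORDS[o & 0xF])
--     return ''.join(partes)
-- ===== Notes on version B (the rewrite author's own statement) =====
-- stated objective: faster
-- what changed: Replaced the intermediate 8-bit binary string and the per-4-bit-slice XOR loop with a single per-character pass that looks up precomputed Hamming(7,4) codewords for each nibble (ord(c)>>4 and ord(c)&0xF) and joins them.
import Mathlib
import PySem

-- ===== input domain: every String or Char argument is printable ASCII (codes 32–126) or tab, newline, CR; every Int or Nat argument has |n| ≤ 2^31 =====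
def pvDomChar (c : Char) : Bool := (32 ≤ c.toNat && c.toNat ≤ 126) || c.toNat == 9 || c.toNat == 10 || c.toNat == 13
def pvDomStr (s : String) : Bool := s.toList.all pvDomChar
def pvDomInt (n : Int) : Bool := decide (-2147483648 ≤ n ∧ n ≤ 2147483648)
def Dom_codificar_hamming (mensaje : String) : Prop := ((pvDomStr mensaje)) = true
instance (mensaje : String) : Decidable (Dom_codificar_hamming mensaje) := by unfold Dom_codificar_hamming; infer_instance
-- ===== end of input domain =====

-- B replaces A's intermediate binary string + per-block XOR loop with per-character
-- nibble extraction and a precomputed nibble→codeword table (objective: simpler).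

-- ===== PORT A =====
-- str(b) for b ∈ {0,1} (the only values the Python produces here)
def pvBitChar (n : Nat) : Char := if n = 0 then '0' else '1'
-- int(c) for c ∈ {'0','1'} (the only characters 'binario' contains)
def pvBitVal (c : Char) : Nat := if c = '1' then 1 else 0
-- f'{n:08b}' for n < 256 (exact on the ASCII domain, where ord(c) ≤ 126)
def pvBits8 (n : Nat) : List Char :=
  [pvBitChar (n / 128 % 2), pvBitChar (n / 64 % 2), pvBitChar (n / 32 % 2),
   pvBitChar (n / 16 % 2), pvBitChar (n / 8 % 2), pvBitChar (n / 4 % 2),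
   pvBitChar (n / 2 % 2), pvBitChar (n % 2)]
-- ''.join(f'{ord(c):08b}' for c in mensaje), as a list of chars
def ascii_a_binario (mensaje : String) : List Char :=
  mensaje.toList.flatMap (fun c => pvBits8 c.toNat)
-- p1 + p2 + datos[0] + p3 + datos[1:]
def pvBlock (a b c d : Char) : List Char :=
  let p1 := pvBitVal a ^^^ pvBitVal b ^^^ pvBitVal d
  let p2 := pvBitVal a ^^^ pvBitVal c ^^^ pvBitVal d
  let p3 := pvBitVal b ^^^ pvBitVal c ^^^ pvBitVal d
  [pvBitChar p1, pvBitChar p2, a, pvBitChar p3, b, c, d]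
-- for i in range(0, len(binario), 4): slice of 4, ljust(4,'0'), emit block
def pvHammLoop (bin : List Char) : List Char :=
  if hne : bin = [] then []
  else
    -- datos = binario[i:i+4].ljust(4, '0')
    match bin.take 4 ++ List.replicate (4 - (bin.take 4).length) '0' with
    | [a, b, c, d] => pvBlock a b c d ++ pvHammLoop (bin.drop 4)
    | _ => pvHammLoop (bin.drop 4)   -- unreachable: ljust(4,'0') always yields 4 chars
termination_by bin.length
decreasing_by
  all_goals
    have : bin.length ≠ 0 := by simpa [List.length_eq_zero_iff] using hne
    simp [List.length_drop]; omega

def codificar_hamming (mensaje : String) : String :=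
  String.ofList (pvHammLoop (ascii_a_binario mensaje))

-- ===== PORT B =====
-- _codeword(n): data bits (n >> (3-k)) & 1, parity bits by the same formulas
def codeword (n : Nat) : List Char :=
  let d0 := (n >>> 3) &&& 1
  let d1 := (n >>> 2) &&& 1
  let d2 := (n >>> 1) &&& 1
  let d3 := n &&& 1
  let p1 := d0 ^^^ d1 ^^^ d3
  let p2 := d0 ^^^ d2 ^^^ d3
  let p3 := d1 ^^^ d2 ^^^ d3
  [pvBitChar p1, pvBitChar p2, pvBitChar d0, pvBitChar p3, pvBitChar d1, pvBitChar d2, pvBitChar d3]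
-- per character: append CODEWORDS[ord(c) >> 4] and CODEWORDS[ord(c) & 0xF], then join
def codificar_hamming_alt (mensaje : String) : String :=
  String.ofList (mensaje.toList.flatMap (fun c => codeword (c.toNat >>> 4) ++ codeword (c.toNat &&& 15)))

-- ===== PRECONDITION & SPEC =====
def Spec_codificar_hamming (mensaje : String) (out : String) : Prop := out = codificar_hamming_alt mensaje
instance (mensaje : String) (out : String) : Decidable (Spec_codificar_hamming mensaje out) := by unfold Spec_codificar_hamming; infer_instance

-- ===== CLAIM (what is proved, stated in full; the proofs are below) =====
def Claim_equal_codificar_hamming : Prop := ∀ (mensaje : String), Dom_codificar_hamming mensaje → Spec_codificar_hamming mensaje (codificar_hamming mensaje)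

-- ===== LEMMAS AND PROOFS =====

lemma pvBlock_hi : ∀ n, n < 256 →
    pvBlock (pvBitChar (n / 128 % 2)) (pvBitChar (n / 64 % 2)) (pvBitChar (n / 32 % 2))
      (pvBitChar (n / 16 % 2)) = codeword (n >>> 4) := by
  set_option maxRecDepth 2000 in decide

lemma pvBlock_lo : ∀ n, n < 256 →
    pvBlock (pvBitChar (n / 8 % 2)) (pvBitChar (n / 4 % 2)) (pvBitChar (n / 2 % 2))
      (pvBitChar (n % 2)) = codeword (n &&& 15) := by
  set_option maxRecDepth 2000 in decide

lemma pvHammLoop_step (n : Nat) (hn : n < 256) (rest : List Char) :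
    pvHammLoop (pvBits8 n ++ rest)
      = codeword (n >>> 4) ++ (codeword (n &&& 15) ++ pvHammLoop rest) := by
  rw [pvBits8, List.cons_append, pvHammLoop]
  simp only [List.take, List.drop, List.length_cons, List.length_nil, List.cons_append,
    List.nil_append, reduceCtorEq, dite_false]
  rw [pvHammLoop]
  simp only [List.take, List.drop, List.length_cons, List.length_nil, List.cons_append,
    List.nil_append, reduceCtorEq, dite_false]
  simp only [List.replicate]
  rw [pvBlock_hi n hn, pvBlock_lo n hn]

lemma pvHammLoop_flatMap (l : List Char) (h : ∀ c ∈ l, c.toNat < 256) :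
    pvHammLoop (l.flatMap (fun c => pvBits8 c.toNat))
      = l.flatMap (fun c => codeword (c.toNat >>> 4) ++ codeword (c.toNat &&& 15)) := by
  induction l with
  | nil => simp [pvHammLoop]
  | cons c l ih =>
    have hc : c.toNat < 256 := h c (by simp)
    rw [List.flatMap_cons, pvHammLoop_step c.toNat hc, List.flatMap_cons,
      ih (fun x hx => h x (by simp [hx])), List.append_assoc]

-- ===== VERDICT (by name: the statement is the Claim_ definition above) =====
theorem codificar_hamming_spec : Claim_equal_codificar_hamming := by
  intro mensaje hdom
  unfold Spec_codificar_hamming codificar_hamming codificar_hamming_alt ascii_a_binario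
  have h : ∀ c ∈ mensaje.toList, c.toNat < 256 := by
    intro c hc
    have := List.all_eq_true.mp hdom c hc
    simp only [pvDomChar, Bool.or_eq_true, Bool.and_eq_true, decide_eq_true_eq,
      beq_iff_eq] at this
    omega
  rw [pvHammLoop_flatMap _ h]
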